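-- pv_equiv track=rewrite | github.com/commel/Taktische_Zeichen_Druckgenerator | gui/main_window.py | _get_all_category_levels
-- ===== SOURCE A (Python) =====
-- def _get_all_category_levels(category_path: str) -> set[str]:
--     """
--     Ermittelt ALLE Kategorie-Ebenen für einen Pfad
--
--     Beispiel:
--         Input:  "Jonas Köritz > Einrichtungen > Feuerwehr"
--         Output: {"Jonas Köritz",
--                  "Jonas Köritz > Einrichtungen",
--                  "Jonas Köritz > Einrichtungen > Feuerwehr"}
--
--     Args:
--         category_path: Vollständiger Kategorie-Pfad
--
--     Returns:
--         set[str]: Set aller Kategorie-Ebenen (inkl. aller Parent-Ebenen)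
--     """
--     if not category_path:
--         return set()
--
--     parts = [p.strip() for p in category_path.split(">")]
--     all_levels = set()
--
--     # Baue alle Ebenen auf
--     current_path = ""
--     for i, part in enumerate(parts):
--         if i == 0:
--             current_path = part
--         else:
--             current_path += f" > {part}"
--         all_levels.add(current_path)
--
--     return all_levels
-- ===== SOURCE B (Python) =====
-- def _get_all_category_levels(category_path: str) -> set[str]:
--     """Same result as A: every hierarchical prefix level of the path."""
--     if not category_path:
--         return set()
--
--     parts = [p.strip() for p in category_path.split(">")]
--     all_levels = set()
--
--     # Build each level independently from the prefix slice.
--     for i in range(len(parts)):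
--         all_levels.add(" > ".join(parts[:i + 1]))
--
--     return all_levels
-- ===== Notes on version B (the rewrite author's own statement) =====
-- stated objective: alternative
-- what changed: Replaces A's accumulator-driven single pass (a running concatenated string carried across iterations with an i==0 special case) by building each level independently as a fresh separator-join over the prefix slice parts[:i+1].
import Mathlib
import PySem

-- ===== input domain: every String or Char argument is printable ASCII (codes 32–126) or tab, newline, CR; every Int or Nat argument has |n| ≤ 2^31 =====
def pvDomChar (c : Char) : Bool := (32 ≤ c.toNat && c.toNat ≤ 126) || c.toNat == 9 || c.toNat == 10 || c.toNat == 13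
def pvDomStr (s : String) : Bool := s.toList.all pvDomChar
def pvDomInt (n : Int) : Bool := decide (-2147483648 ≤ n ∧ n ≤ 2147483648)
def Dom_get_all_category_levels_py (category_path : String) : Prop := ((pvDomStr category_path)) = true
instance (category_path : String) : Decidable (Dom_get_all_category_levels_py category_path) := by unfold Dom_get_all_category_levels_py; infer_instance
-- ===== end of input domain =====

-- B builds each category level independently as a separator-join over the fresh prefix slice parts[:i+1],
-- instead of A's running-accumulator concatenation; alternative decomposition, same cost.


-- ===== PORT A =====
-- Strings are handled on the List Char side (PySem.Chars), results wrapped back as Strings.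
-- loop body of A: current_path update (i == 0 special case) and all_levels.add(current_path)
def pvStepA (st : List Char × PySem.Set (List Char)) (ip : Int × List Char) :
    List Char × PySem.Set (List Char) :=
  let cur := if ip.1 = 0 then ip.2 else st.1 ++ [' ', '>', ' '] ++ ip.2
  (cur, st.2.add cur)
def get_all_category_levels_py (category_path : String) : List String :=
  if category_path = "" then []
  else
    let parts : List (List Char) :=
      (PySem.Chars.splitOn category_path.toList ['>']).map PySem.Chars.strip
    -- for i, part in enumerate(parts): current_path accumulator + set of levels
    let fin :=
      (PySem.List.enumerate parts).foldl pvStepA ([], PySem.Set.ofList [])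
    fin.2.map String.ofList

-- ===== PORT B =====
def get_all_category_levels_py_alt (category_path : String) : List String :=
  if category_path = "" then []
  else
    let parts : List (List Char) :=
      (PySem.Chars.splitOn category_path.toList ['>']).map PySem.Chars.strip
    -- for i in range(len(parts)): all_levels.add(" > ".join(parts[:i+1]))
    let levels :=
      (List.range parts.length).foldl
        (fun (acc : PySem.Set (List Char)) i =>
          acc.add (PySem.Chars.join [' ', '>', ' '] (parts.take (i + 1))))
        (PySem.Set.ofList [])
    levels.map String.ofList

-- ===== PRECONDITION & SPEC =====
def Spec_get_all_category_levels_py (category_path : String) (out : List String) : Prop := out = get_all_category_levels_py_alt category_path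
instance (category_path : String) (out : List String) : Decidable (Spec_get_all_category_levels_py category_path out) := by unfold Spec_get_all_category_levels_py; infer_instance

-- ===== CLAIM (what is proved, stated in full; the proofs are below) =====
def Claim_equal_get_all_category_levels_py : Prop := ∀ (category_path : String), Dom_get_all_category_levels_py category_path → Spec_get_all_category_levels_py category_path (get_all_category_levels_py category_path)

-- ===== LEMMAS AND PROOFS =====

-- The sequence of levels produced after a current prefix `cur`: each step appends " > " ++ next part.
def pvChain (cur : List Char) : List (List Char) → List (List Char)
  | [] => []
  | r :: rs => (cur ++ [' ', '>', ' '] ++ r) :: pvChain (cur ++ [' ', '>', ' '] ++ r) rs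

-- join of a nonempty list extended by one element
theorem pvJoin_append_singleton (pre : List (List Char)) (y : List Char) (h : pre ≠ []) :
    PySem.Chars.join [' ', '>', ' '] (pre ++ [y])
      = PySem.Chars.join [' ', '>', ' '] pre ++ [' ', '>', ' '] ++ y := by
  induction pre with
  | nil => simp at h
  | cons a t ih =>
    cases t with
    | nil => simp [PySem.Chars.join_singleton, PySem.Chars.join_cons_cons]
    | cons b t' =>
      rw [List.cons_append, PySem.Chars.join_cons_cons, List.cons_append,
        PySem.Chars.join_cons_cons, ← List.cons_append, ih (by simp)]
      simp

-- B's mapped range of prefix joins is the chain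
theorem pvB_chain (rest : List (List Char)) : ∀ (pre : List (List Char)), pre ≠ [] →
    (List.range rest.length).map
        (fun i => PySem.Chars.join [' ', '>', ' '] (pre ++ rest.take (i + 1)))
      = pvChain (PySem.Chars.join [' ', '>', ' '] pre) rest := by
  induction rest with
  | nil => intro pre _; simp [pvChain]
  | cons r rs ih =>
    intro pre hpre
    rw [List.length_cons, List.range_succ_eq_map, List.map_cons, List.map_map]
    have h0 : PySem.Chars.join [' ', '>', ' '] (pre ++ (r :: rs).take (0 + 1))
        = PySem.Chars.join [' ', '>', ' '] pre ++ [' ', '>', ' '] ++ r := by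
      simpa using pvJoin_append_singleton pre r hpre
    have hstep : ((fun i => PySem.Chars.join [' ', '>', ' '] (pre ++ (r :: rs).take (i + 1))) ∘ Nat.succ)
        = fun i => PySem.Chars.join [' ', '>', ' '] ((pre ++ [r]) ++ rs.take (i + 1)) := by
      funext i; simp [Function.comp, List.take_succ_cons]
    rw [hstep, ih (pre ++ [r]) (by simp), pvChain, h0,
      pvJoin_append_singleton pre r hpre]

-- A's fold over the tail (indices ≥ 1) adds exactly the chain, threading the accumulator string
theorem pvA_fold (rest : List (List Char)) :
    ∀ (k : Int) (cur : List Char) (acc : PySem.Set (List Char)), 1 ≤ k →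
    (PySem.List.enumerate rest k).foldl pvStepA (cur, acc)
      = ((pvChain cur rest).getLastD cur, (pvChain cur rest).foldl PySem.Set.add acc) := by
  induction rest with
  | nil => intro k cur acc _; simp [PySem.List.enumerate, pvChain]
  | cons r rs ih =>
    intro k cur acc hk
    have hk0 : ¬ (k = 0) := by omega
    simp only [PySem.List.enumerate, List.foldl_cons, pvStepA, hk0, if_false]
    rw [ih (k + 1) _ _ (by omega)]
    rw [show pvChain cur (r :: rs)
        = (cur ++ [' ', '>', ' '] ++ r) :: pvChain (cur ++ [' ', '>', ' '] ++ r) rs from rfl]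
    rw [List.foldl_cons, Prod.mk.injEq]
    exact ⟨by cases pvChain (cur ++ [' ', '>', ' '] ++ r) rs <;> simp [List.getLastD], rfl⟩

-- ===== VERDICT (by name: the statement is the Claim_ definition above) =====
theorem get_all_category_levels_py_spec : Claim_equal_get_all_category_levels_py := by
  intro s _
  unfold Spec_get_all_category_levels_py get_all_category_levels_py get_all_category_levels_py_alt
  by_cases hs : s = ""
  · simp [hs]
  · simp only [hs, if_false]
    set parts := (PySem.Chars.splitOn s.toList ['>']).map PySem.Chars.strip with hparts
    cases hp : parts with
    | nil => simp [PySem.List.enumerate]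
    | cons p rest =>
      congr 1
      -- A's side: first iteration (index 0), then the tail fold
      rw [show PySem.List.enumerate (p :: rest) = (0, p) :: PySem.List.enumerate rest 1 from by
        simp [PySem.List.enumerate]]
      rw [List.foldl_cons,
        show pvStepA ([], PySem.Set.ofList []) (0, p) = (p, (PySem.Set.ofList []).add p) from by
          simp [pvStepA],
        pvA_fold rest 1 p ((PySem.Set.ofList []).add p) le_rfl]
      -- B's side: fold of adds = fold over the mapped list, which is p :: chain
      rw [← List.foldl_map
        (f := fun i => PySem.Chars.join [' ', '>', ' '] ((p :: rest).take (i + 1)))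
        (g := PySem.Set.add)]
      have : (List.range (p :: rest).length).map
          (fun i => PySem.Chars.join [' ', '>', ' '] ((p :: rest).take (i + 1)))
          = p :: pvChain p rest := by
        rw [List.length_cons, List.range_succ_eq_map, List.map_cons, List.map_map]
        have h0 : PySem.Chars.join [' ', '>', ' '] ((p :: rest).take (0 + 1)) = p := by
          simp [PySem.Chars.join_singleton]
        have hstep : ((fun i => PySem.Chars.join [' ', '>', ' '] ((p :: rest).take (i + 1))) ∘ Nat.succ)
            = fun i => PySem.Chars.join [' ', '>', ' '] ([p] ++ rest.take (i + 1)) := by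
          funext i; simp [Function.comp, List.take_succ_cons]
        rw [h0, hstep, pvB_chain rest [p] (by simp), PySem.Chars.join_singleton]
      rw [this, List.foldl_cons]
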